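-- pv_equiv track=rewrite | github.com/leopcortes/unb | ed/grafos/sol_exercicio_grafos.py | todosOsCaminhosParaOAlvo
-- ===== SOURCE A (Python) =====
-- from typing import List
--
-- def todosOsCaminhosParaOAlvo(grafo: List[List[int]]):
--     # lista de todos os caminhos
--     caminhos = []
--
--     # funcao recursiva que vai percorrer o grafo
--     def percorrer(grafo: List[List[int]], vertice_atual: int, destino: int, caminho: List[int]):
--         # copia o caminho feito ate agora (evita a perda de informacao durante as chamadas recursivas)
--         caminho_atual = caminho.copy()
--
--         # adiciona o vertice atual
--         caminho_atual.append(vertice_atual)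
--
--         # se chegamos no destino, retornamos o caminho feito
--         if vertice_atual == destino:
--             caminhos.append(caminho_atual)
--             return
--
--         # vizinhos do vertice atual
--         for prox in grafo[vertice_atual]:
--             # vemos se eh possivel chegar ao destino a partir do vizinho do vertice atual
--             percorrer(grafo, prox, destino, caminho_atual)
--
--     # comeca o percurso
--     percorrer(grafo, 0, len(grafo)-1, [])
--
--     return caminhos
-- ===== SOURCE B (Python) =====
-- def todosOsCaminhosParaOAlvo(grafo):
--     # iterative DFS with an explicit stack instead of A's recursive nested closure
--     destino = len(grafo) - 1
--     caminhos = []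
--     pilha = [(0, [])]
--     while pilha:
--         vertice, caminho = pilha.pop()
--         caminho = caminho + [vertice]
--         if vertice == destino:
--             caminhos.append(caminho)
--         else:
--             for prox in reversed(grafo[vertice]):
--                 pilha.append((prox, caminho))
--     return caminhos
-- ===== Notes on version B (the rewrite author's own statement) =====
-- stated objective: alternative
-- what changed: A's recursive nested-closure DFS is replaced by an iterative loop over an explicit stack of (vertex, path) states, pushing neighbours in reverse so the pop order reproduces A's left-to-right pre-order path enumeration.
import Mathlib
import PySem

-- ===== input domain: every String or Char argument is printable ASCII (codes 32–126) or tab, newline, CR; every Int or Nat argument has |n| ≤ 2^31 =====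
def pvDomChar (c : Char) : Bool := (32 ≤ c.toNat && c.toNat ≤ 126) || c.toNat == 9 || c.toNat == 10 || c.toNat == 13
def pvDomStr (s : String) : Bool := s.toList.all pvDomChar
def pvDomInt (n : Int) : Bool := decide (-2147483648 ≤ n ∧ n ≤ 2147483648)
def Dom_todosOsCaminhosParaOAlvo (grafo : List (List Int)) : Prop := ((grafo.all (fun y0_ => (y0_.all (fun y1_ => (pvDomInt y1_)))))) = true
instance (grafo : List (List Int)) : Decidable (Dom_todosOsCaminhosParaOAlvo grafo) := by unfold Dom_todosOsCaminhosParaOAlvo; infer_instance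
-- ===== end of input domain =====

-- ===== PORT A =====
-- B changes only the traversal mechanism (explicit stack instead of recursion); equivalence is
-- proved on every input on which the Python A returns (Pre_ below).

-- A's inner recursive function `percorrer`; `fuel` only makes the recursion total in Lean
-- (under Pre_ the fuel supplied below is never exhausted).  The `none` branch of pyGet? is
-- Python's IndexError, excluded by Pre_.
def pvPercorrer (grafo : List (List Int)) : Nat → Int → Int → List Int → List (List Int) → List (List Int)
  | 0, _, _, _, caminhos => caminhos
  | fuel+1, vertice, destino, caminho, caminhos =>
    let caminho_atual := caminho ++ [vertice]
    if vertice = destino then caminhos ++ [caminho_atual]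
    else
      match PySem.List.pyGet? grafo vertice with
      | none => caminhos
      | some viz => viz.foldl (fun cs prox => pvPercorrer grafo fuel prox destino caminho_atual cs) caminhos

-- fuel budget: under Pre_ the DFS recursion depth is at most the number of distinct reachable
-- vertices + 1 ≤ pvSteps grafo (a pure size bound; no algorithmic content)
def pvSteps (grafo : List (List Int)) : Nat := grafo.flatten.length + 2

def todosOsCaminhosParaOAlvo (grafo : List (List Int)) : List (List Int) :=
  pvPercorrer grafo (pvSteps grafo) 0 ((grafo.length : Int) - 1) [] []

-- ===== PORT B =====
-- Fuel for B's while loop: the number of loop iterations = size of the DFS tree from vertex 0.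
-- This helper only bounds the iteration count so the loop is total in Lean; it computes no path.
def pvCost (grafo : List (List Int)) (destino : Int) : Nat → Int → Nat
  | 0, _ => 1
  | fuel+1, vertice =>
    if vertice = destino then 1
    else
      match PySem.List.pyGet? grafo vertice with
      | none => 1
      | some viz => 1 + (viz.map (pvCost grafo destino fuel)).sum

-- The while loop of Source B.  The Python stack has its top at the END and pushes reversed(grafo[v]);
-- here the stack list has its top at the HEAD, so pushing reversed(viz) one by one is exactly
-- prepending `viz.map …` in order.  fuel = iteration budget (never exhausted under Pre_).
def pvLoopB (grafo : List (List Int)) (destino : Int) : Nat → List (Int × List Int) → List (List Int) → List (List Int)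
  | 0, _, caminhos => caminhos
  | _+1, [], caminhos => caminhos
  | fuel+1, (vertice, caminho) :: pilha, caminhos =>
    let caminho_atual := caminho ++ [vertice]
    if vertice = destino then pvLoopB grafo destino fuel pilha (caminhos ++ [caminho_atual])
    else
      match PySem.List.pyGet? grafo vertice with
      | none => caminhos
      | some viz => pvLoopB grafo destino fuel (viz.map (fun prox => (prox, caminho_atual)) ++ pilha) caminhos

def todosOsCaminhosParaOAlvo_alt (grafo : List (List Int)) : List (List Int) :=
  pvLoopB grafo ((grafo.length : Int) - 1)
    (pvCost grafo ((grafo.length : Int) - 1) (pvSteps grafo) 0) [(0, [])] []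

-- ===== PRECONDITION & SPEC =====
-- The vertices A's DFS can reach from 0 (the recursion stops at `destino`, so `destino` has no
-- successors here; an out-of-range vertex contributes none).  pvReach is the closure of {0}
-- under one-step successors; pvSteps iterations suffice to saturate it (proved below).
def pvNbrs (grafo : List (List Int)) (destino v : Int) : List Int :=
  if v = destino then [] else (PySem.List.pyGet? grafo v).getD []

def pvExpand (grafo : List (List Int)) (destino : Int) (s : Finset Int) : Finset Int :=
  s ∪ s.biUnion (fun v => (pvNbrs grafo destino v).toFinset)

def pvReach (grafo : List (List Int)) (destino : Int) : Finset Int :=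
  (pvExpand grafo destino)^[pvSteps grafo] {0}

def pvReachFrom (grafo : List (List Int)) (destino v : Int) : Finset Int :=
  (pvExpand grafo destino)^[pvSteps grafo] (pvNbrs grafo destino v).toFinset

-- Pre_ admits exactly the inputs on which the Python A returns: the graph is non-empty (on [] A
-- raises IndexError at grafo[0]), every vertex the DFS reaches before being cut off by the
-- target is a valid index (otherwise IndexError), and no reached vertex can reach itself
-- (otherwise the unbounded recursion raises RecursionError).
def Pre_todosOsCaminhosParaOAlvo (grafo : List (List Int)) : Prop :=
  grafo ≠ [] ∧
  (∀ v ∈ pvReach grafo ((grafo.length : Int) - 1),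
      v ≠ (grafo.length : Int) - 1 → (PySem.List.pyGet? grafo v).isSome = true) ∧
  (∀ v ∈ pvReach grafo ((grafo.length : Int) - 1),
      v ∉ pvReachFrom grafo ((grafo.length : Int) - 1) v)

instance (grafo : List (List Int)) : Decidable (Pre_todosOsCaminhosParaOAlvo grafo) := by
  unfold Pre_todosOsCaminhosParaOAlvo; infer_instance

def pvWitness_todosOsCaminhosParaOAlvo : List (List Int) := [[1, 2], [2], []]

def Spec_todosOsCaminhosParaOAlvo (grafo : List (List Int)) (out : List (List Int)) : Prop := out = todosOsCaminhosParaOAlvo_alt grafo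
instance (grafo : List (List Int)) (out : List (List Int)) : Decidable (Spec_todosOsCaminhosParaOAlvo grafo out) := by unfold Spec_todosOsCaminhosParaOAlvo; infer_instance

-- ===== CLAIM (what is proved, stated in full; the proofs are below) =====
def Claim_equal_todosOsCaminhosParaOAlvo : Prop := ∀ (grafo : List (List Int)), Dom_todosOsCaminhosParaOAlvo grafo → Pre_todosOsCaminhosParaOAlvo grafo → Spec_todosOsCaminhosParaOAlvo grafo (todosOsCaminhosParaOAlvo grafo)

-- ===== LEMMAS AND PROOFS =====

-- universe of vertices any expansion can ever produce: 0 and the edge targets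
def pvU (grafo : List (List Int)) : Finset Int := insert 0 grafo.flatten.toFinset

theorem pv_nbrs_subset_flatten (grafo : List (List Int)) (destino v : Int) :
    ∀ x ∈ pvNbrs grafo destino v, x ∈ grafo.flatten := by
  intro x hx
  unfold pvNbrs at hx
  split at hx
  · simp at hx
  · cases hg : PySem.List.pyGet? grafo v with
    | none => rw [hg] at hx; simp at hx
    | some l =>
      rw [hg] at hx
      exact List.mem_flatten.mpr ⟨l, PySem.List.mem_of_pyGet?_eq_some grafo hg, hx⟩

theorem pv_expand_infl (grafo : List (List Int)) (destino : Int) (s : Finset Int) :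
    s ⊆ pvExpand grafo destino s := Finset.subset_union_left

theorem pv_expand_bounded (grafo : List (List Int)) (destino : Int) {s : Finset Int}
    (hs : s ⊆ pvU grafo) : pvExpand grafo destino s ⊆ pvU grafo := by
  unfold pvExpand
  apply Finset.union_subset hs
  intro x hx
  obtain ⟨v, _, hxv⟩ := Finset.mem_biUnion.mp hx
  have := pv_nbrs_subset_flatten grafo destino v x (List.mem_toFinset.mp hxv)
  unfold pvU
  simp [List.mem_toFinset.mpr this]

theorem pv_iterate_infl (grafo : List (List Int)) (destino : Int) (s : Finset Int) :
    ∀ {k m : Nat}, k ≤ m →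
      (pvExpand grafo destino)^[k] s ⊆ (pvExpand grafo destino)^[m] s := by
  intro k m hkm
  induction m with
  | zero => simp_all
  | succ m ih =>
    rcases Nat.lt_or_ge k (m+1) with h | h
    · rw [Function.iterate_succ_apply']
      exact (ih (by omega)).trans (pv_expand_infl ..)
    · have : k = m + 1 := by omega
      subst this; rfl

theorem pv_iterate_bounded (grafo : List (List Int)) (destino : Int) {s : Finset Int}
    (hs : s ⊆ pvU grafo) (k : Nat) :
    (pvExpand grafo destino)^[k] s ⊆ pvU grafo := by
  induction k with
  | zero => exact hs
  | succ k ih => rw [Function.iterate_succ_apply']; exact pv_expand_bounded grafo destino ih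

theorem pv_card_U (grafo : List (List Int)) : (pvU grafo).card < pvSteps grafo := by
  unfold pvU pvSteps
  have h1 := Finset.card_insert_le (0 : Int) grafo.flatten.toFinset
  have h2 := grafo.flatten.toFinset_card_le
  omega

-- after pvSteps iterations the expansion has reached a fixpoint (counting argument)
theorem pv_iterate_fix (grafo : List (List Int)) (destino : Int) {s : Finset Int}
    (hs : s ⊆ pvU grafo) :
    pvExpand grafo destino ((pvExpand grafo destino)^[pvSteps grafo] s)
      = (pvExpand grafo destino)^[pvSteps grafo] s := by
  by_cases hfix : ∃ k < pvSteps grafo,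
      pvExpand grafo destino ((pvExpand grafo destino)^[k] s) = (pvExpand grafo destino)^[k] s
  · obtain ⟨k, hk, hfx⟩ := hfix
    have hprop : ∀ m, (pvExpand grafo destino)^[k + m] s = (pvExpand grafo destino)^[k] s := by
      intro m
      induction m with
      | zero => rfl
      | succ m ih => rw [← Nat.add_assoc, Function.iterate_succ_apply', ih, hfx]
    have h1 : (pvExpand grafo destino)^[pvSteps grafo] s = (pvExpand grafo destino)^[k] s := by
      have := hprop (pvSteps grafo - k)
      rwa [Nat.add_sub_cancel' (le_of_lt hk)] at this
    rw [h1, hfx]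
  · exfalso
    push Not at hfix
    have hgrow : ∀ k, k ≤ pvSteps grafo → k ≤ ((pvExpand grafo destino)^[k] s).card := by
      intro k
      induction k with
      | zero => simp
      | succ k ih =>
        intro hk
        have hne := hfix k (by omega)
        have hsub : (pvExpand grafo destino)^[k] s ⊂ (pvExpand grafo destino)^[k+1] s := by
          rw [Function.iterate_succ_apply']
          exact lt_of_le_of_ne (pv_expand_infl ..) (fun h => hne h.symm)
        have := Finset.card_lt_card hsub
        have := ih (by omega)
        omega
    have hb := Finset.card_le_card (pv_iterate_bounded grafo destino hs (pvSteps grafo))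
    have := pv_card_U grafo
    have := hgrow (pvSteps grafo) le_rfl
    omega

theorem pv_zero_subset_U (grafo : List (List Int)) : ({0} : Finset Int) ⊆ pvU grafo := by
  unfold pvU; intro x hx; simp at hx; simp [hx]

theorem pv_nbrs_toFinset_subset_U (grafo : List (List Int)) (destino v : Int) :
    (pvNbrs grafo destino v).toFinset ⊆ pvU grafo := by
  intro x hx
  have := pv_nbrs_subset_flatten grafo destino v x (List.mem_toFinset.mp hx)
  unfold pvU
  simp [List.mem_toFinset.mpr this]

theorem pv_mem_expand_of_nbr (grafo : List (List Int)) (destino : Int) {s : Finset Int}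
    {v j : Int} (hv : v ∈ s) (hj : j ∈ pvNbrs grafo destino v) :
    j ∈ pvExpand grafo destino s := by
  unfold pvExpand
  exact Finset.mem_union_right _ (Finset.mem_biUnion.mpr ⟨v, hv, List.mem_toFinset.mpr hj⟩)

theorem pv_reach_closed (grafo : List (List Int)) (destino : Int) {v j : Int}
    (hv : v ∈ pvReach grafo destino) (hj : j ∈ pvNbrs grafo destino v) :
    j ∈ pvReach grafo destino := by
  have := pv_mem_expand_of_nbr grafo destino hv hj
  unfold pvReach at this ⊢
  rwa [pv_iterate_fix grafo destino (pv_zero_subset_U grafo)] at this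

theorem pv_reachFrom_closed (grafo : List (List Int)) (destino : Int) {x v j : Int}
    (hv : v ∈ pvReachFrom grafo destino x) (hj : j ∈ pvNbrs grafo destino v) :
    j ∈ pvReachFrom grafo destino x := by
  have := pv_mem_expand_of_nbr grafo destino hv hj
  unfold pvReachFrom at this ⊢
  rwa [pv_iterate_fix grafo destino (pv_nbrs_toFinset_subset_U grafo destino x)] at this

theorem pv_nbrs_subset_reachFrom (grafo : List (List Int)) (destino v : Int) :
    ∀ j ∈ pvNbrs grafo destino v, j ∈ pvReachFrom grafo destino v := by
  intro j hj
  exact pv_iterate_infl grafo destino _ (Nat.zero_le _) (List.mem_toFinset.mpr hj)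

theorem pv_mem_reach_zero (grafo : List (List Int)) (destino : Int) :
    (0 : Int) ∈ pvReach grafo destino :=
  pv_iterate_infl grafo destino _ (Nat.zero_le _) (by simp)

theorem pv_card_reach (grafo : List (List Int)) (destino : Int) :
    (pvReach grafo destino).card < pvSteps grafo :=
  lt_of_le_of_lt
    (Finset.card_le_card (pv_iterate_bounded grafo destino (pv_zero_subset_U grafo) _))
    (pv_card_U grafo)

-- generic fuel-invariance for any DFS-shaped recursion r over the graph: once the fuel covers
-- the number of still-unvisited reachable vertices, its value no longer depends on the fuel.
-- `visited` is the chain of vertices on the current DFS branch; acyclicity (H2) makes revisits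
-- impossible, which bounds the branch length by (pvReach).card.
theorem pv_fuel_inv {α : Type} (grafo : List (List Int)) (destino : Int) (r : Nat → Int → α)
    (base : Int → α) (miss : α) (comb : Int → List α → α)
    (Hr : ∀ f v, r (f+1) v = if v = destino then base v else
      match PySem.List.pyGet? grafo v with
      | none => miss
      | some viz => comb v (viz.map (r f)))
    (H1 : ∀ v ∈ pvReach grafo destino, v ≠ destino → (PySem.List.pyGet? grafo v).isSome = true)
    (H2 : ∀ v ∈ pvReach grafo destino, v ∉ pvReachFrom grafo destino v) :
    ∀ (f1 f2 : Nat) (v : Int) (visited : List Int),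
      v ∈ pvReach grafo destino → (∀ x ∈ visited, x ∈ pvReach grafo destino) →
      (visited ++ [v]).Nodup →
      (∀ x ∈ visited, v ∈ pvReachFrom grafo destino x) →
      (pvReach grafo destino).card - visited.length ≤ f1 →
      (pvReach grafo destino).card - visited.length ≤ f2 →
      r f1 v = r f2 v := by
  intro f1
  induction f1 with
  | zero =>
    intro f2 v visited hv hvis hnd hinv hb1 hb2
    exfalso
    have hsub : (visited ++ [v]).toFinset ⊆ pvReach grafo destino := by
      intro x hx
      rcases List.mem_append.mp (List.mem_toFinset.mp hx) with h | h
      · exact hvis x h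
      · simp at h; subst h; exact hv
    have hcard := Finset.card_le_card hsub
    rw [List.toFinset_card_of_nodup hnd] at hcard
    simp at hcard
    omega
  | succ a ih =>
    intro f2 v visited hv hvis hnd hinv hb1 hb2
    -- positivity of the remaining budget
    have hlen : visited.length + 1 ≤ (pvReach grafo destino).card := by
      have hsub : (visited ++ [v]).toFinset ⊆ pvReach grafo destino := by
        intro x hx
        rcases List.mem_append.mp (List.mem_toFinset.mp hx) with h | h
        · exact hvis x h
        · simp at h; subst h; exact hv
      have hcard := Finset.card_le_card hsub
      rw [List.toFinset_card_of_nodup hnd] at hcard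
      simpa using hcard
    cases f2 with
    | zero => omega
    | succ b =>
      rw [Hr a v, Hr b v]
      by_cases hvd : v = destino
      · simp [hvd]
      · simp only [hvd, if_false]
        cases hg : PySem.List.pyGet? grafo v with
        | none => exact absurd (hg ▸ H1 v hv hvd) (by simp)
        | some viz =>
          have hviz : pvNbrs grafo destino v = viz := by
            unfold pvNbrs; rw [if_neg hvd, hg]; rfl
          dsimp only
          congr 1
          apply List.map_congr_left
          intro j hjviz
          have hj : j ∈ pvNbrs grafo destino v := by rw [hviz]; exact hjviz
          have hjR : j ∈ pvReach grafo destino := pv_reach_closed grafo destino hv hj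
          have hjF : j ∈ pvReachFrom grafo destino v := pv_nbrs_subset_reachFrom grafo destino v j hj
          have hjnew : j ∉ visited ++ [v] := by
            intro hmem
            rcases List.mem_append.mp hmem with h | h
            · have : j ∈ pvReachFrom grafo destino j :=
                pv_reachFrom_closed grafo destino (hinv j h) hj
              exact H2 j (hvis j h) this
            · simp at h; subst h
              exact H2 j hjR hjF
          exact ih b j (visited ++ [v]) hjR
            (by intro x hx; rcases List.mem_append.mp hx with h | h
                · exact hvis x h
                · simp at h; subst h; exact hv)
            (by simp only [List.nodup_append, hnd, List.nodup_singleton, true_and]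
                intro x hx y hy
                rw [List.mem_singleton] at hy
                subst hy
                exact fun h => hjnew (h ▸ hx))
            (by intro x hx
                rcases List.mem_append.mp hx with h | h
                · exact pv_reachFrom_closed grafo destino (hinv x h) hj
                · simp at h; subst h; exact hjF)
            (by simp only [List.length_append, List.length_cons, List.length_nil]; omega)
            (by simp only [List.length_append, List.length_cons, List.length_nil]; omega)

-- pvPaths: the list of paths from `vertice` to `destino`, with the same fuel shape as A.
def pvPaths (grafo : List (List Int)) (destino : Int) : Nat → Int → List (List Int)
  | 0, _ => []
  | fuel+1, vertice =>
    if vertice = destino then [[vertice]]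
    else
      match PySem.List.pyGet? grafo vertice with
      | none => []
      | some viz => viz.flatMap (fun j => (pvPaths grafo destino fuel j).map (fun q => vertice :: q))

theorem pv_paths_Hr (grafo : List (List Int)) (destino : Int) :
    ∀ (f : Nat) (v : Int), pvPaths grafo destino (f+1) v =
      if v = destino then [[v]] else
      match PySem.List.pyGet? grafo v with
      | none => []
      | some viz => (viz.map (pvPaths grafo destino f)).flatten.map (fun q => v :: q) := by
  intro f v
  simp only [pvPaths]
  split
  · rfl
  · cases PySem.List.pyGet? grafo v with
    | none => rfl
    | some viz => simp [List.flatMap_def, List.map_flatten, List.map_map, Function.comp_def]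

theorem pv_cost_Hr (grafo : List (List Int)) (destino : Int) :
    ∀ (f : Nat) (v : Int), pvCost grafo destino (f+1) v =
      if v = destino then 1 else
      match PySem.List.pyGet? grafo v with
      | none => 1
      | some viz => 1 + (viz.map (pvCost grafo destino f)).sum := by
  intro f v
  simp only [pvCost]

theorem pv_foldl_flat {β : Type} (F : List (List Int) → β → List (List Int)) (g : β → List (List Int))
    (l : List β) (h : ∀ b ∈ l, ∀ cs, F cs b = cs ++ g b) :
    ∀ cs0, l.foldl F cs0 = cs0 ++ l.flatMap g := by
  induction l with
  | nil => simp
  | cons b l ih =>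
    intro cs0
    simp only [List.foldl_cons, List.flatMap_cons]
    rw [h b (by simp), ih (fun x hx => h x (by simp [hx])), List.append_assoc]

-- A's accumulator-threading recursion computes pvPaths, prefixed by the path so far.
theorem pv_percorrer_eq (grafo : List (List Int)) (destino : Int) :
    ∀ (fuel : Nat) (vertice : Int) (caminho : List Int) (caminhos : List (List Int)),
      pvPercorrer grafo fuel vertice destino caminho caminhos
        = caminhos ++ (pvPaths grafo destino fuel vertice).map (caminho ++ ·) := by
  intro fuel
  induction fuel with
  | zero => intro v c cs; simp [pvPercorrer, pvPaths]
  | succ f ih =>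
    intro v caminho caminhos
    simp only [pvPercorrer, pvPaths]
    by_cases hv : v = destino
    · simp [hv]
    · simp only [hv, if_false]
      cases hg : PySem.List.pyGet? grafo v with
      | none => simp
      | some viz =>
        dsimp only
        rw [pv_foldl_flat _ (fun j => (pvPaths grafo destino f j).map ((caminho ++ [v]) ++ ·))
              viz (fun j _ cs => ih j (caminho ++ [v]) cs)]
        simp [List.map_flatMap, Function.comp_def, List.map_map, List.append_assoc]

theorem pv_cost_pos (grafo : List (List Int)) (destino : Int) :
    ∀ (f : Nat) (v : Int), 1 ≤ pvCost grafo destino f v := by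
  intro f v
  cases f with
  | zero => simp [pvCost]
  | succ a =>
    simp only [pvCost]
    split
    · omega
    · cases PySem.List.pyGet? grafo v <;> simp

-- at full fuel pvSteps, a DFS-shaped recursion satisfies its own recurrence with the SAME fuel
theorem pv_full_step {α : Type} (grafo : List (List Int)) (destino : Int) (r : Nat → Int → α)
    (base : Int → α) (miss : α) (comb : Int → List α → α)
    (Hr : ∀ f v, r (f+1) v = if v = destino then base v else
      match PySem.List.pyGet? grafo v with
      | none => miss
      | some viz => comb v (viz.map (r f)))
    (H1 : ∀ v ∈ pvReach grafo destino, v ≠ destino → (PySem.List.pyGet? grafo v).isSome = true)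
    (H2 : ∀ v ∈ pvReach grafo destino, v ∉ pvReachFrom grafo destino v)
    {v : Int} (hv : v ∈ pvReach grafo destino) (hvd : v ≠ destino) {viz : List Int}
    (hg : PySem.List.pyGet? grafo v = some viz) :
    r (pvSteps grafo) v = comb v (viz.map (r (pvSteps grafo))) := by
  have hstep : pvSteps grafo = (grafo.flatten.length + 1) + 1 := rfl
  have hviz : pvNbrs grafo destino v = viz := by
    unfold pvNbrs; rw [if_neg hvd, hg]; rfl
  rw [hstep, Hr _ v, if_neg hvd, hg]
  dsimp only
  congr 1
  apply List.map_congr_left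
  intro j hjviz
  have hj : j ∈ pvNbrs grafo destino v := by rw [hviz]; exact hjviz
  have hjR : j ∈ pvReach grafo destino := pv_reach_closed grafo destino hv hj
  have hjne : j ≠ v := by
    intro h; subst h
    exact H2 j hjR (pv_nbrs_subset_reachFrom grafo destino j j hj)
  have hcard := pv_card_reach grafo destino
  exact pv_fuel_inv grafo destino r base miss comb Hr H1 H2
    (grafo.flatten.length + 1) ((grafo.flatten.length + 1) + 1) j [v] hjR
    (by intro x hx; simp at hx; subst hx; exact hv)
    (by have hne : v ≠ j := fun h => hjne h.symm
        simp [hne])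
    (by intro x hx; simp at hx; subst hx
        exact pv_nbrs_subset_reachFrom grafo destino x j hj)
    (by simp only [List.length_cons, List.length_nil]; rw [hstep] at hcard; omega)
    (by simp only [List.length_cons, List.length_nil]; rw [hstep] at hcard; omega)

theorem pv_full_base {α : Type} (grafo : List (List Int)) (destino : Int) (r : Nat → Int → α)
    (base : Int → α) (miss : α) (comb : Int → List α → α)
    (Hr : ∀ f v, r (f+1) v = if v = destino then base v else
      match PySem.List.pyGet? grafo v with
      | none => miss
      | some viz => comb v (viz.map (r f))) :
    r (pvSteps grafo) destino = base destino := by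
  have hstep : pvSteps grafo = (grafo.flatten.length + 1) + 1 := rfl
  rw [hstep, Hr _ destino, if_pos rfl]

-- B's stack loop drains the stack into the concatenation of the per-state path lists.
theorem pv_loopB_eq (grafo : List (List Int)) (destino : Int)
    (H1 : ∀ v ∈ pvReach grafo destino, v ≠ destino → (PySem.List.pyGet? grafo v).isSome = true)
    (H2 : ∀ v ∈ pvReach grafo destino, v ∉ pvReachFrom grafo destino v) :
    ∀ (fb : Nat) (stack : List (Int × List Int)) (acc : List (List Int)),
      (∀ s ∈ stack, s.1 ∈ pvReach grafo destino) →
      (stack.map (fun s => pvCost grafo destino (pvSteps grafo) s.1)).sum ≤ fb →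
      pvLoopB grafo destino fb stack acc
        = acc ++ stack.flatMap
            (fun s => (pvPaths grafo destino (pvSteps grafo) s.1).map (s.2 ++ ·)) := by
  intro fb
  induction fb with
  | zero =>
    intro stack acc hg hc
    cases stack with
    | nil => simp [pvLoopB]
    | cons s rest =>
      exfalso
      have := pv_cost_pos grafo destino (pvSteps grafo) s.1
      simp only [List.map_cons, List.sum_cons] at hc
      omega
  | succ f ih =>
    intro stack acc hg hc
    cases stack with
    | nil => simp [pvLoopB]
    | cons s rest =>
      obtain ⟨v, p⟩ := s
      have hv : v ∈ pvReach grafo destino := hg (v, p) (by simp)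
      simp only [pvLoopB, List.map_cons, List.sum_cons, List.flatMap_cons] at hc ⊢
      by_cases hvd : v = destino
      · simp only [hvd, if_true]
        have hc1 : pvCost grafo destino (pvSteps grafo) destino = 1 :=
          pv_full_base grafo destino _ _ 1 (fun _ rs => 1 + rs.sum) (pv_cost_Hr grafo destino)
        rw [hvd, hc1] at hc
        rw [ih rest _ (fun x hx => hg x (by simp [hx])) (by omega)]
        have hp : pvPaths grafo destino (pvSteps grafo) destino = [[destino]] :=
          pv_full_base grafo destino _ (fun w => [[w]]) []
            (fun w rs => rs.flatten.map (fun q => w :: q)) (pv_paths_Hr grafo destino)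
        rw [hp]
        simp [List.append_assoc]
      · simp only [hvd, if_false]
        cases hgE : PySem.List.pyGet? grafo v with
        | none => exact absurd (hgE ▸ H1 v hv hvd) (by simp)
        | some viz =>
          dsimp only
          have hviz : pvNbrs grafo destino v = viz := by
            unfold pvNbrs; rw [if_neg hvd, hgE]; rfl
          have hcost : pvCost grafo destino (pvSteps grafo) v
              = 1 + (viz.map (pvCost grafo destino (pvSteps grafo))).sum :=
            pv_full_step grafo destino _ _ 1 (fun _ rs => 1 + rs.sum)
              (pv_cost_Hr grafo destino) H1 H2 hv hvd hgE
          have hpaths : pvPaths grafo destino (pvSteps grafo) v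
              = ((viz.map (pvPaths grafo destino (pvSteps grafo))).flatten).map
                  (fun q => v :: q) :=
            pv_full_step grafo destino _ (fun w => [[w]]) []
              (fun w rs => rs.flatten.map (fun q => w :: q))
              (pv_paths_Hr grafo destino) H1 H2 hv hvd hgE
          have hgood' : ∀ s ∈ viz.map (fun prox => (prox, p ++ [v])) ++ rest,
              s.1 ∈ pvReach grafo destino := by
            intro s hs
            rcases List.mem_append.mp hs with hs | hs
            · obtain ⟨j, hj, rfl⟩ := List.mem_map.mp hs
              exact pv_reach_closed grafo destino hv (hviz ▸ hj)
            · exact hg s (by simp [hs])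
          have hcost' : ((viz.map (fun prox => (prox, p ++ [v])) ++ rest).map
                (fun s => pvCost grafo destino (pvSteps grafo) s.1)).sum ≤ f := by
            have hmm : ((viz.map (fun prox => (prox, p ++ [v]))).map
                (fun s => pvCost grafo destino (pvSteps grafo) s.1))
                = viz.map (pvCost grafo destino (pvSteps grafo)) := by
              simp [List.map_map, Function.comp_def]
            rw [List.map_append, hmm, List.sum_append]
            rw [hcost] at hc
            omega
          rw [ih _ acc hgood' hcost', hpaths]
          simp [List.map_flatten, List.map_map, Function.comp_def,
            List.flatMap_def, List.append_assoc]

-- ===== VERDICT (by name: the statement is the Claim_ definition above) =====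
theorem todosOsCaminhosParaOAlvo_spec : Claim_equal_todosOsCaminhosParaOAlvo := by
  intro grafo _hDom hPre
  obtain ⟨-, H1, H2⟩ := hPre
  unfold Spec_todosOsCaminhosParaOAlvo todosOsCaminhosParaOAlvo todosOsCaminhosParaOAlvo_alt
  rw [pv_percorrer_eq,
    pv_loopB_eq grafo ((grafo.length : Int) - 1) H1 H2 _ [(0, [])] []
      (by intro s hs; simp at hs; subst hs; exact pv_mem_reach_zero ..)
      (by simp)]
  simp
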